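-- pv_equiv track=rewrite | github.com/joonfluence/algorithm | 이코테/greedy/3-10_무지의_먹방_라이브-2.py | solution
-- ===== SOURCE A (Python) =====
-- import heapq
--
-- def solution(food_times, k):
--     # 총 음식 식사 시간보다 K가 크면 남은 음식이 없으므로
--     if sum(food_times) <= k:
--         return -1
--
--     q = [] # 시간이 작은 음식부터 빼야 하므로 우선순위 큐(최소 힙)를 이용
--     for i in range(len(food_times)):
--         heapq.heappush(q, (food_times[i], i+1)) # (시간, 인덱스)
--
--     sum_value = 0 # 먹기 위해 사용한 시간
--     previous_eat_time = 0 # 직전에 다 먹은 음식 시간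
--     rest_food_count = len(food_times) # 남은 음식 수
--
--     # sum_value + (현재의 음식 시간 - 이전 음식 시간) * 현재 음식 개수와 K 비교
--     while sum_value + ((q[0][0] - previous_eat_time) * rest_food_count) <= k:
--         current_eat_time = heapq.heappop(q)[0] # 현재 음식을 먹는데 걸리는 시간
--         sum_value += (current_eat_time - previous_eat_time) * rest_food_count
--         rest_food_count -= 1 # 다 먹은 음식 제외
--         previous_eat_time = current_eat_time # 이전 음식 시간 재설정
--
--     result = sorted(q, key=lambda x: x[1]) # 인덱스 기준으로 정렬
--     return result[(k-sum_value) % rest_food_count][1] # 남은 음식 기준으로 나머지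
-- ===== SOURCE B (Python) =====
-- def solution(food_times, k):
--     n = len(food_times)
--     if sum(food_times) <= k:
--         return -1
--     # binary search for the largest "level" t with total time spent(t) = sum(min(f, t)) <= k;
--     # no heap, no sort of the times at all
--     def spent(t):
--         return sum(min(f, t) for f in food_times)
--     lo = min(min(food_times) - 1, k, 0)  # spent(lo) = n*lo <= lo <= k
--     hi = max(food_times)                 # spent(hi) = sum(food_times) > k
--     while hi - lo > 1:
--         mid = (lo + hi) // 2
--         if spent(mid) <= k:
--             lo = mid
--         else:
--             hi = mid
--     rest = [i + 1 for i, f in enumerate(food_times) if f > lo]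
--     return rest[(k - spent(lo)) % len(rest)]
-- ===== Notes on version B (the rewrite author's own statement) =====
-- stated objective: alternative
-- what changed: Replaces A's heap simulation entirely by a binary search on the answer: it searches the largest level t with sum(min(f,t), f in food_times) <= k, never orders the food times at all, and reads the surviving indices straight off enumerate(food_times) in index order.
import Mathlib
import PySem

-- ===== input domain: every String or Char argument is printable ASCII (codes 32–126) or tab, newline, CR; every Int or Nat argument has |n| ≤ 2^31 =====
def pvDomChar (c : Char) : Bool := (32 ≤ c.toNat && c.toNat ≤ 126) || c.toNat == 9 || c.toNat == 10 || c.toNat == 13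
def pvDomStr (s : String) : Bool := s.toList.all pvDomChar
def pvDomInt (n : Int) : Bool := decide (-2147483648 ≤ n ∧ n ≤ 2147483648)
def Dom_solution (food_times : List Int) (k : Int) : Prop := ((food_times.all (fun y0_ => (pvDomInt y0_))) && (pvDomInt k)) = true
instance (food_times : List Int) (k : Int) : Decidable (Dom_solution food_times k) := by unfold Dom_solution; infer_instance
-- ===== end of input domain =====

-- B drops A's heap simulation in favour of a binary search for the largest level t with
-- sum(min(f,t)) <= k; the surviving foods are then read off enumerate(food_times) in index
-- order (alternative algorithm, no ordering of the times at all).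

-- ===== PORT A =====
-- heapq is modeled by its observable contract: the heap q is kept as the list of its elements in
-- increasing (time, index) order (Python's tuple order = toLex), heappush is ordered insertion,
-- heappop takes the head and q[0] is the head. This is exact here because heappop always returns
-- the least remaining tuple and all tuples (time, i+1) are distinct.
def heappush (q : List (Int × Int)) (x : Int × Int) : List (Int × Int) :=
  PySem.List.insertBy (fun a b => decide (toLex a < toLex b)) x q

-- the while loop: state (q, sum_value, previous_eat_time, rest_food_count); on an empty heap
-- Python's q[0] raises IndexError (outside Pre_), junk 0 there
def aLoop (k : Int) : List (Int × Int) → Int → Int → Int → Int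
  | [], _, _, _ => 0
  | (t, i) :: rest, sumValue, prevEatTime, restCount =>
    if sumValue + (t - prevEatTime) * restCount ≤ k then
      aLoop k rest (sumValue + (t - prevEatTime) * restCount) t (restCount - 1)
    else
      -- result = sorted(q, key=lambda x: x[1]); return result[(k-sum_value) % rest_food_count][1]
      (PySem.List.pyGetD (PySem.List.sorted ((t, i) :: rest) (fun x => x.2))
        (PySem.Int.mod (k - sumValue) restCount) (0, 0)).2

def solution (food_times : List Int) (k : Int) : Int :=
  if food_times.sum ≤ k then -1
  else
    let q := (PySem.List.pyRange 0 (PySem.List.len food_times) 1).foldl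
      (fun q i => heappush q (PySem.List.pyGetD food_times i 0, i + 1)) []
    aLoop k q 0 0 (PySem.List.len food_times)

-- ===== PORT B =====
-- spent(t) = sum(min(f, t) for f in food_times)
def spentB (food_times : List Int) (t : Int) : Int :=
  (food_times.map (fun f => min f t)).sum

-- while hi - lo > 1: mid = (lo+hi)//2; keep the invariant spent(lo) <= k < spent(hi)
def bsearch (food_times : List Int) (k : Int) (lo hi : Int) : Int :=
  if _h : 1 < hi - lo then
    let mid := PySem.Int.floordiv (lo + hi) 2
    if spentB food_times mid ≤ k then bsearch food_times k mid hi
    else bsearch food_times k lo mid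
  else lo
termination_by (hi - lo).toNat
decreasing_by
  all_goals
    simp only [PySem.Int.floordiv_eq_ediv_of_pos (by norm_num : (0:Int) < 2)] at *
    omega

def solution_alt (food_times : List Int) (k : Int) : Int :=
  if food_times.sum ≤ k then -1
  else
    let lo0 := min (min ((PySem.List.min? food_times (fun x => x)).getD 0 - 1) k) 0
    let hi0 := (PySem.List.max? food_times (fun x => x)).getD 0
    let lo := bsearch food_times k lo0 hi0
    let rest := ((PySem.List.enumerate food_times 0).filter
      (fun p => decide (lo < p.2))).map (fun p => p.1 + 1)
    PySem.List.pyGetD rest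
      (PySem.Int.mod (k - spentB food_times lo) (PySem.List.len rest)) 0

-- ===== PRECONDITION & SPEC =====
-- Pre_ excludes only the inputs where A raises: food_times = [] with k < 0 (then sum([]) = 0 > k,
-- the loop guard reads q[0] of the empty heap and raises IndexError; B raises on min([]) there).
def Pre_solution (food_times : List Int) (k : Int) : Prop := food_times = [] → 0 ≤ k
instance (food_times : List Int) (k : Int) : Decidable (Pre_solution food_times k) := by
  unfold Pre_solution; infer_instance

def pvWitness_solution : List Int × Int := ([3, 1, 2], 5)

def Spec_solution (food_times : List Int) (k : Int) (out : Int) : Prop := out = solution_alt food_times k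
instance (food_times : List Int) (k : Int) (out : Int) : Decidable (Spec_solution food_times k out) := by unfold Spec_solution; infer_instance

-- ===== CLAIM (what is proved, stated in full; the proofs are below) =====
def Claim_equal_solution : Prop := ∀ (food_times : List Int) (k : Int), Dom_solution food_times k → Pre_solution food_times k → Spec_solution food_times k (solution food_times k)

-- ===== LEMMAS AND PROOFS =====

-- the pairs (food_times[i], i+1) that A pushes on the heap
def allPairs (ft : List Int) : List (Int × Int) :=
  (PySem.List.pyRange 0 (PySem.List.len ft) 1).map
    (fun i => (PySem.List.pyGetD ft i 0, i + 1))

-- B's remaining-index list and final answer expression, named for the proofs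
def restB (ft : List Int) (lo : Int) : List Int :=
  ((PySem.List.enumerate ft 0).filter (fun p => decide (lo < p.2))).map (fun p => p.1 + 1)

def ansB (ft : List Int) (k lo : Int) : Int :=
  PySem.List.pyGetD (restB ft lo)
    (PySem.Int.mod (k - spentB ft lo) (PySem.List.len (restB ft lo))) 0

lemma sum_min_of_le (L : List Int) (t : Int) (h : ∀ x ∈ L, x ≤ t) :
    (L.map (fun f => min f t)).sum = L.sum := by
  induction L with
  | nil => rfl
  | cons a l ih =>
    simp only [List.map_cons, List.sum_cons,
      ih (fun x hx => h x (List.mem_cons_of_mem a hx))]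
    have := h a List.mem_cons_self
    omega

lemma sum_min_of_ge (L : List Int) (t : Int) (h : ∀ x ∈ L, t ≤ x) :
    (L.map (fun f => min f t)).sum = t * L.length := by
  induction L with
  | nil => simp
  | cons a l ih =>
    simp only [List.map_cons, List.sum_cons,
      ih (fun x hx => h x (List.mem_cons_of_mem a hx)), List.length_cons]
    have := h a List.mem_cons_self
    push_cast
    have : min a t = t := by omega
    rw [this]; ring

lemma spentB_mono (ft : List Int) {t u : Int} (h : t ≤ u) :
    spentB ft t ≤ spentB ft u := by
  unfold spentB
  induction ft with
  | nil => simp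
  | cons a l ih => simp only [List.map_cons, List.sum_cons]; omega

lemma spentB_perm (ft L : List Int) (t : Int) (h : L.Perm ft) :
    spentB ft t = (L.map (fun f => min f t)).sum := by
  unfold spentB
  exact ((h.map (fun f => min f t)).sum_eq).symm

lemma map_fst_allPairs (ft : List Int) : (allPairs ft).map Prod.fst = ft := by
  unfold allPairs
  rw [List.map_map]
  exact PySem.List.map_pyGetD_pyRange_zero ft 0

lemma snd_allPairs_pairwise (ft : List Int) :
    (allPairs ft).Pairwise (fun p q : Int × Int => p.2 < q.2) := by
  unfold allPairs
  refine List.Pairwise.map _ ?_ (PySem.List.pairwise_lt_pyRange_one 0 (PySem.List.len ft))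
  intro a b hab
  simpa using hab

-- the binary search keeps spent(lo) <= k < spent(hi), so its result t satisfies
-- spent(t) <= k < spent(t+1)
lemma bsearch_spec (ft : List Int) (k : Int) :
    ∀ (n : Nat) (lo hi : Int), (hi - lo).toNat ≤ n →
      spentB ft lo ≤ k → k < spentB ft hi →
      spentB ft (bsearch ft k lo hi) ≤ k ∧ k < spentB ft (bsearch ft k lo hi + 1) := by
  intro n
  induction n with
  | zero =>
    intro lo hi hfuel h1 h2
    exfalso
    have hle : hi ≤ lo := by omega
    exact absurd (lt_of_le_of_lt h1 h2) (not_lt.mpr (spentB_mono ft hle))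
  | succ n ih =>
    intro lo hi hfuel h1 h2
    by_cases hgt : 1 < hi - lo
    · rw [bsearch, dif_pos hgt]
      have hmid : PySem.Int.floordiv (lo + hi) 2 = (lo + hi) / 2 :=
        PySem.Int.floordiv_eq_ediv_of_pos (by norm_num)
      by_cases hb : spentB ft (PySem.Int.floordiv (lo + hi) 2) ≤ k
      · rw [if_pos hb]
        exact ih _ hi (by rw [hmid] at *; omega) hb h2
      · rw [if_neg hb]
        exact ih lo _ (by rw [hmid] at *; omega) h1 (by omega)
    · rw [bsearch, dif_neg hgt]
      refine ⟨h1, ?_⟩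
      have hlt : lo < hi := by
        by_contra hle
        exact absurd (lt_of_le_of_lt h1 h2) (not_lt.mpr (spentB_mono ft (by omega)))
      have : hi = lo + 1 := by omega
      rw [← this]; exact h2

-- sorted(food_times as lex pairs) bridge: restB is the snd-projection of the filtered pair list
lemma restB_eq (ft : List Int) (lo : Int) :
    restB ft lo
      = ((allPairs ft).filter (fun p => decide (lo < p.1))).map Prod.snd := by
  unfold restB allPairs
  rw [PySem.List.enumerate_eq_map_pyRange ft 0, List.filter_map, List.filter_map,
    List.map_map, List.map_map]
  rfl

-- the main loop lemma: A's heap loop, started in any state reachable with popped prefix P,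
-- lands on B's binary-search answer
lemma loopA_eq (ft : List Int) (k lo : Int)
    (hk : ¬ ft.sum ≤ k)
    (hlo : spentB ft lo ≤ k) (hhi : k < spentB ft (lo + 1)) :
    ∀ (S P : List (Int × Int)) (prev : Int),
      (P ++ S).Perm (allPairs ft) →
      (∀ p ∈ P, p.1 ≤ lo) →
      (∀ p ∈ P, ∀ q ∈ S, p.1 ≤ q.1) →
      S.Pairwise (fun a b => a.1 ≤ b.1) →
      aLoop k S (((P.map Prod.fst).sum) + prev * S.length) prev (S.length : Int)
        = ansB ft k lo := by
  intro S
  induction S with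
  | nil =>
    intro P prev hperm hP _ _
    exfalso
    apply hk
    have hperm' : ((P ++ ([] : List (Int × Int))).map Prod.fst).Perm ft := by
      have := hperm.map Prod.fst
      rwa [map_fst_allPairs] at this
    rw [List.append_nil] at hperm'
    have h1 : spentB ft lo = (P.map Prod.fst).sum := by
      rw [spentB_perm ft (P.map Prod.fst) lo hperm']
      exact sum_min_of_le _ lo (by
        intro x hx
        obtain ⟨p, hp, rfl⟩ := List.mem_map.mp hx
        exact hP p hp)
    have h2 : (P.map Prod.fst).sum = ft.sum := hperm'.sum_eq
    omega
  | cons hd tl ih =>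
    obtain ⟨t, i⟩ := hd
    intro P prev hperm hP hcross hpw
    have hperm' : ((P ++ (t, i) :: tl).map Prod.fst).Perm ft := by
      have := hperm.map Prod.fst
      rwa [map_fst_allPairs] at this
    have hheadtl : ∀ q ∈ tl, t ≤ q.1 :=
      fun q hq => (List.pairwise_cons.mp hpw).1 q hq
    have hSge : ∀ q ∈ (t, i) :: tl, t ≤ q.1 := by
      intro q hq
      rcases List.mem_cons.mp hq with h | h
      · subst h; exact le_refl _
      · exact hheadtl q h
    have hPle : ∀ p ∈ P, p.1 ≤ t :=
      fun p hp => hcross p hp (t, i) List.mem_cons_self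
    have hspent_t : spentB ft t
        = (P.map Prod.fst).sum + t * (((t, i) :: tl).length : Int) := by
      rw [spentB_perm ft _ t hperm', List.map_append, List.map_append, List.sum_append]
      rw [sum_min_of_le (P.map Prod.fst) t (by
        intro x hx; obtain ⟨p, hp, rfl⟩ := List.mem_map.mp hx; exact hPle p hp)]
      rw [sum_min_of_ge (((t, i) :: tl).map Prod.fst) t (by
        intro x hx; obtain ⟨p, hp, rfl⟩ := List.mem_map.mp hx; exact hSge p hp)]
      rw [List.length_map]
    by_cases hg : spentB ft t ≤ k
    · -- guard true: pop (t, i), recurse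
      have hTlo : t ≤ lo := by
        by_contra hlt
        have : lo + 1 ≤ t := by omega
        have := spentB_mono ft this
        omega
      have hcond : (P.map Prod.fst).sum + prev * (((t, i) :: tl).length : Int)
          + (t - prev) * (((t, i) :: tl).length : Int) ≤ k := by
        have : (P.map Prod.fst).sum + prev * (((t, i) :: tl).length : Int)
            + (t - prev) * (((t, i) :: tl).length : Int) = spentB ft t := by
          rw [hspent_t]; ring
        omega
      rw [aLoop, if_pos hcond]
      have e1 : (P.map Prod.fst).sum + prev * (((t, i) :: tl).length : Int)
          + (t - prev) * (((t, i) :: tl).length : Int)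
          = (((P ++ [(t, i)]).map Prod.fst).sum) + t * (tl.length : Int) := by
        simp only [List.map_append, List.sum_append, List.map_cons, List.map_nil,
          List.sum_cons, List.sum_nil, List.length_cons]
        push_cast; ring
      have e2 : (((t, i) :: tl).length : Int) - 1 = (tl.length : Int) := by
        simp [List.length_cons]
      rw [e1, e2]
      exact ih (P ++ [(t, i)]) t
        (by rwa [List.append_assoc, List.singleton_append] at *)
        (by
          intro p hp
          rcases List.mem_append.mp hp with h | h
          · exact hP p h
          · rcases List.mem_singleton.mp h with rfl; exact hTlo)
        (by
          intro p hp q hq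
          rcases List.mem_append.mp hp with h | h
          · exact hcross p h q (List.mem_cons_of_mem _ hq)
          · rcases List.mem_singleton.mp h with rfl; exact hheadtl q hq)
        ((List.pairwise_cons.mp hpw).2)
    · -- guard false: the loop stops here
      have hlt : lo < t := by
        by_contra hle
        push Not at hle
        have := spentB_mono ft hle
        omega
      have hSgt : ∀ q ∈ (t, i) :: tl, lo < q.1 :=
        fun q hq => lt_of_lt_of_le hlt (hSge q hq)
      have hcond : ¬ ((P.map Prod.fst).sum + prev * (((t, i) :: tl).length : Int)
          + (t - prev) * (((t, i) :: tl).length : Int) ≤ k) := by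
        have : (P.map Prod.fst).sum + prev * (((t, i) :: tl).length : Int)
            + (t - prev) * (((t, i) :: tl).length : Int) = spentB ft t := by
          rw [hspent_t]; ring
        omega
      rw [aLoop, if_neg hcond]
      have hPfilter : P.filter (fun p => decide (lo < p.1)) = [] := by
        rw [List.filter_eq_nil_iff]
        intro p hp
        simp only [decide_eq_true_eq]
        exact not_lt.mpr (hP p hp)
      have hSfilter : ((t, i) :: tl).filter (fun p => decide (lo < p.1)) = (t, i) :: tl := by
        rw [List.filter_eq_self]
        intro q hq
        simp only [decide_eq_true_eq]
        exact hSgt q hq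
      have hSF : ((t, i) :: tl).Perm
          ((allPairs ft).filter (fun p => decide (lo < p.1))) := by
        have := hperm.filter (fun p => decide (lo < p.1))
        rwa [List.filter_append, hPfilter, hSfilter, List.nil_append] at this
      have hFpw : ((allPairs ft).filter (fun p => decide (lo < p.1))).Pairwise
          (fun a b : Int × Int => a.2 < b.2) :=
        (snd_allPairs_pairwise ft).filter _
      have hsortedS : PySem.List.sorted ((t, i) :: tl) (fun x => x.2)
          = (allPairs ft).filter (fun p => decide (lo < p.1)) :=
        PySem.List.sorted_eq_of_perm_of_pairwise_lt _ _ _ hSF.symm hFpw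
      have hlenF : ((allPairs ft).filter (fun p => decide (lo < p.1))).length
          = ((t, i) :: tl).length := hSF.symm.length_eq
      have hspent_lo : spentB ft lo
          = (P.map Prod.fst).sum + lo * (((t, i) :: tl).length : Int) := by
        rw [spentB_perm ft _ lo hperm', List.map_append, List.map_append, List.sum_append]
        rw [sum_min_of_le (P.map Prod.fst) lo (by
          intro x hx; obtain ⟨p, hp, rfl⟩ := List.mem_map.mp hx; exact hP p hp)]
        rw [sum_min_of_ge (((t, i) :: tl).map Prod.fst) lo (by
          intro x hx; obtain ⟨p, hp, rfl⟩ := List.mem_map.mp hx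
          exact le_of_lt (hSgt p hp))]
        rw [List.length_map]
      have hcpos : (0 : Int) < (((t, i) :: tl).length : Int) := by
        simp [List.length_cons]
      have hmod : PySem.Int.mod
            (k - ((P.map Prod.fst).sum + prev * (((t, i) :: tl).length : Int)))
            (((t, i) :: tl).length : Int)
          = PySem.Int.mod (k - spentB ft lo) (((t, i) :: tl).length : Int) := by
        rw [PySem.Int.mod_eq_emod_of_pos hcpos, PySem.Int.mod_eq_emod_of_pos hcpos]
        have h1 : k - ((P.map Prod.fst).sum + prev * (((t, i) :: tl).length : Int))
            = (k - spentB ft lo) + (((t, i) :: tl).length : Int) * (lo - prev) := by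
          rw [hspent_lo]; ring
        rw [h1, Int.add_mul_emod_self_left]
      rw [hsortedS, hmod]
      unfold ansB
      rw [restB_eq]
      have hlen2 : PySem.List.len
          (((allPairs ft).filter (fun p => decide (lo < p.1))).map Prod.snd)
          = (((t, i) :: tl).length : Int) := by
        simp [PySem.List.len, hlenF]
      rw [hlen2]
      exact (PySem.List.pyGetD_map Prod.snd _ _ ((0 : Int), (0 : Int))).symm

-- ===== VERDICT (by name: the statement is the Claim_ definition above) =====
theorem solution_spec : Claim_equal_solution := by
  intro ft k _hdom hpre
  unfold Spec_solution solution solution_alt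
  by_cases hs : ft.sum ≤ k
  · simp [hs]
  · obtain ⟨m, hm⟩ : ∃ m, PySem.List.min? ft (fun x => x) = some m := by
      cases h : PySem.List.min? ft (fun x => x) with
      | none =>
        exfalso
        apply hs
        have : ft = [] := by
          have := PySem.List.min?_eq_none_iff (xs := ft) (key := fun x => x)
          tauto
        subst this
        simpa using hpre rfl
      | some m => exact ⟨m, rfl⟩
    obtain ⟨M, hM⟩ : ∃ M, PySem.List.max? ft (fun x => x) = some M := by
      cases h : PySem.List.max? ft (fun x => x) with
      | none =>
        exfalso
        apply hs
        have : ft = [] := by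
          have := PySem.List.max?_eq_none_iff (xs := ft) (key := fun x => x)
          tauto
        subst this
        simpa using hpre rfl
      | some M => exact ⟨M, rfl⟩
    have hne : ft ≠ [] := by
      intro h
      subst h
      exact hs (by simpa using hpre rfl)
    simp only [if_neg hs, hm, hM, Option.getD_some]
    have hmmin : ∀ x ∈ ft, m ≤ x := PySem.List.min?_isMin hm
    have hMmax : ∀ x ∈ ft, x ≤ M := PySem.List.max?_isMax hM
    have hn1 : 1 ≤ ft.length := List.length_pos_iff.mpr hne
    set lo0 : Int := min (min (m - 1) k) 0 with hlo0def
    have hslo0 : spentB ft lo0 ≤ k := by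
      have hconst : spentB ft lo0 = lo0 * ft.length := by
        unfold spentB
        exact sum_min_of_ge ft lo0 (by
          intro x hx
          have h1 := hmmin x hx
          have h2 : lo0 ≤ m - 1 := le_trans (min_le_left _ _) (min_le_left _ _)
          omega)
      have h0 : lo0 ≤ 0 := min_le_right _ _
      have hk0 : lo0 ≤ k := le_trans (min_le_left _ _) (min_le_right _ _)
      have hmul : lo0 * (ft.length : Int) ≤ lo0 * 1 :=
        mul_le_mul_of_nonpos_left (by exact_mod_cast hn1) h0
      rw [hconst]
      omega
    have hshi0 : k < spentB ft M := by
      unfold spentB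
      rw [sum_min_of_le ft M hMmax]
      omega
    obtain ⟨hlo, hhi⟩ := bsearch_spec ft k (M - lo0).toNat lo0 M le_rfl hslo0 hshi0
    set lo : Int := bsearch ft k lo0 M with hlodef
    have hq : ((PySem.List.pyRange 0 (PySem.List.len ft) 1).foldl
        (fun q i => heappush q (PySem.List.pyGetD ft i 0, i + 1)) [])
        = PySem.List.sorted (allPairs ft) (fun p => toLex p) := by
      rw [PySem.List.sorted_eq_foldl_insertBy]
      unfold allPairs
      rw [List.foldl_map]
      rfl
    rw [hq]
    set S := PySem.List.sorted (allPairs ft) (fun p => toLex p) with hSdef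
    have hpw : S.Pairwise (fun a b : Int × Int => a.1 ≤ b.1) := by
      refine (PySem.List.sorted_pairwise (allPairs ft) (fun p => toLex p)).imp ?_
      intro a b hab
      rcases Prod.Lex.le_iff.mp hab with h | ⟨h, _⟩
      · exact le_of_lt h
      · exact le_of_eq h
    have hperm : (([] : List (Int × Int)) ++ S).Perm (allPairs ft) := by
      simpa using PySem.List.sorted_perm (allPairs ft) (fun p => toLex p) false
    have hlen : PySem.List.len ft = (S.length : Int) := by
      simp [hSdef, PySem.List.len, PySem.List.length_sorted, allPairs,
        PySem.List.length_pyRange_one]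
    have h0 := loopA_eq ft k lo hs hlo hhi S [] 0 hperm (by simp) (by simp) hpw
    simp only [List.map_nil, List.sum_nil, zero_mul, add_zero] at h0
    rw [hlen, h0]
    unfold ansB restB
    rfl
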